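-- pv_equiv track=rewrite | github.com/jraymondli/usaco-1 | December 2014 Prob 1/2014_December_1_Marathon.py | derive_answer
-- ===== SOURCE A (Python) =====
-- def distance_between_two_points(point1, point2):  # Works
--     return abs(point2[0] - point1[0]) + abs(point2[1] - point1[1])
--
-- def find_dist(points):  # Should work
--     last_point = points[0]
--     dist = 0
--     for x, y in points:
--         dist += distance_between_two_points(last_point, [x, y])
--         last_point = [x, y]
--     return dist
--
-- def derive_answer(input_points):
--     max_length = 0
--     # Use manual counting instead of using the built in index() function
--     # Do this because manual counting always gives right index you are referring to. The index(function) goes to the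
--     # first element with the VALUE of the parameter.
--     for index_value in range(len(input_points[1:-1:])):
--         distance_between_all_points = find_dist([input_points[index_value], input_points[index_value+1],
--                                                  input_points[index_value+2]])
--         distance_between_point_removed = find_dist([input_points[index_value], input_points[index_value+2]])
--         new_distance = distance_between_all_points-distance_between_point_removed
--         if new_distance > max_length:
--             max_length = new_distance
--
--     return find_dist(input_points)-max_length
-- ===== SOURCE B (Python) =====
-- def derive_answer(input_points):
--     def path_len(pts):
--         return sum(abs(b[0] - a[0]) + abs(b[1] - a[1]) for a, b in zip(pts, pts[1:]))
--     best = path_len(input_points)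
--     for i in range(1, len(input_points) - 1):
--         best = min(best, path_len(input_points[:i] + input_points[i + 1:]))
--     return best
-- ===== Notes on version B (the rewrite author's own statement) =====
-- stated objective: simpler
-- what changed: Instead of A's single savings pass (max over interior points of the constant-time triangle savings, subtracted from the total), B brute-forces the definition: it recomputes the full path length with each interior checkpoint deleted and takes the minimum over these and the unmodified path.
import Mathlib
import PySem

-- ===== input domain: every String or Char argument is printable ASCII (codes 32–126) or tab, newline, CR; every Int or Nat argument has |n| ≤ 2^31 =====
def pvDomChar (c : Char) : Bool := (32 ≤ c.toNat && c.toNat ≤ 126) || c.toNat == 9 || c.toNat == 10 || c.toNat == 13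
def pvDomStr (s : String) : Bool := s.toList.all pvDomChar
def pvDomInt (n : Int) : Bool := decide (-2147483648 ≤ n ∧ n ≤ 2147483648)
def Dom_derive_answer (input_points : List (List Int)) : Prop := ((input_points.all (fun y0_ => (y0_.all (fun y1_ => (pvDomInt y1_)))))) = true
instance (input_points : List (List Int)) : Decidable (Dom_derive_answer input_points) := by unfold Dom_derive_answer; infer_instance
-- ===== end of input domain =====

-- B replaces A's single O(n) savings pass by the brute-force definition (recompute the whole
-- path with each interior point deleted, take the minimum): simpler to see correct, not faster.

-- ===== PORT A =====
def distance_between_two_points (point1 point2 : List Int) : Int :=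
  |PySem.List.pyGetD point2 0 0 - PySem.List.pyGetD point1 0 0| +
  |PySem.List.pyGetD point2 1 0 - PySem.List.pyGetD point1 1 0|

-- 'for x, y in points' rebuilds the pair as [x, y]; exact on Pre_ (every point has length 2,
-- so [x, y] is the point itself); on other inputs Python raises and Pre_ excludes them.
def find_dist (points : List (List Int)) : Int :=
  (points.foldl (fun (s : List Int × Int) p => (p, s.2 + distance_between_two_points s.1 p))
    (PySem.List.pyGetD points 0 [], 0)).2

def derive_answer (input_points : List (List Int)) : Int :=
  let max_length : Int :=
    (PySem.List.pyRange 0 ((PySem.List.slice input_points (some 1) (some (-1))).length : Int) 1).foldl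
      (fun max_length index_value =>
        let distance_between_all_points :=
          find_dist [PySem.List.pyGetD input_points index_value [],
                     PySem.List.pyGetD input_points (index_value + 1) [],
                     PySem.List.pyGetD input_points (index_value + 2) []]
        let distance_between_point_removed :=
          find_dist [PySem.List.pyGetD input_points index_value [],
                     PySem.List.pyGetD input_points (index_value + 2) []]
        let new_distance := distance_between_all_points - distance_between_point_removed
        if new_distance > max_length then new_distance else max_length) 0
  find_dist input_points - max_length

-- ===== PORT B =====
def path_len (pts : List (List Int)) : Int :=
  ((pts.zip (PySem.List.slice pts (some 1) none)).map (fun ab =>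
    |PySem.List.pyGetD ab.2 0 0 - PySem.List.pyGetD ab.1 0 0| +
    |PySem.List.pyGetD ab.2 1 0 - PySem.List.pyGetD ab.1 1 0|)).sum

def derive_answer_alt (input_points : List (List Int)) : Int :=
  (PySem.List.pyRange 1 ((input_points.length : Int) - 1) 1).foldl
    (fun best i => min best (path_len (PySem.List.slice input_points none (some i) ++
                                       PySem.List.slice input_points (some (i + 1)) none)))
    (path_len input_points)

-- ===== PRECONDITION & SPEC =====
-- Pre_: exactly where the Python A returns normally (nonempty list, every point unpacks as x, y).
def Pre_derive_answer (input_points : List (List Int)) : Prop :=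
  input_points ≠ [] ∧ ∀ p ∈ input_points, p.length = 2
instance (input_points : List (List Int)) : Decidable (Pre_derive_answer input_points) := by
  unfold Pre_derive_answer; infer_instance
def pvWitness_derive_answer : List (List Int) := [[0, 0], [2, 0], [1, 5], [3, 0]]

def Spec_derive_answer (input_points : List (List Int)) (out : Int) : Prop :=
  out = derive_answer_alt input_points
instance (input_points : List (List Int)) (out : Int) : Decidable (Spec_derive_answer input_points out) := by
  unfold Spec_derive_answer; infer_instance

-- ===== CLAIM (what is proved, stated in full; the proofs are below) =====
def Claim_equal_derive_answer : Prop := ∀ (input_points : List (List Int)), Dom_derive_answer input_points → Pre_derive_answer input_points → Spec_derive_answer input_points (derive_answer input_points)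

-- ===== LEMMAS AND PROOFS =====

-- the path length written as a structural recursion from a previous point
def pvWalk (l : List Int) (ps : List (List Int)) : Int :=
  match ps with
  | [] => 0
  | p :: t => distance_between_two_points l p + pvWalk p t

-- the point preceding index j when rest is walked from l
def pvPrev (l : List Int) (r : List (List Int)) (j : Nat) : List Int :=
  match j with
  | 0 => l
  | Nat.succ k => r.getD k []

-- savings of deleting index j of r on a walk from l
def pvSav (l : List Int) (r : List (List Int)) (j : Nat) : Int :=
  distance_between_two_points (pvPrev l r j) (r.getD j []) +
  distance_between_two_points (r.getD j []) (r.getD (j + 1) []) -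
  distance_between_two_points (pvPrev l r j) (r.getD (j + 1) [])

-- A's running maximum of the savings
def pvMax (x0 : List Int) (rest : List (List Int)) (k : Nat) : Int :=
  (List.range k).foldl (fun ml j => if pvSav x0 rest j > ml then pvSav x0 rest j else ml) 0

theorem pvDist_self (p : List Int) : distance_between_two_points p p = 0 := by
  simp [distance_between_two_points]

theorem pvFoldl_walk (ps : List (List Int)) (l : List Int) (acc : Int) :
    (ps.foldl (fun (s : List Int × Int) p => (p, s.2 + distance_between_two_points s.1 p))
      (l, acc)).2 = acc + pvWalk l ps := by
  induction ps generalizing l acc with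
  | nil => simp [pvWalk]
  | cons p t ih => simp [List.foldl_cons, ih, pvWalk]; ring

theorem path_len_cons (p : List Int) (t : List (List Int)) :
    path_len (p :: t) = pvWalk p t := by
  induction t generalizing p with
  | nil => simp [path_len, pvWalk, PySem.List.slice_from_one]
  | cons q t' ih =>
      have h := ih q
      simp only [path_len, PySem.List.slice_from_one, List.tail_cons] at h ⊢
      simp only [List.zip_cons_cons, List.map_cons, List.sum_cons]
      rw [h]
      simp [pvWalk, distance_between_two_points]

theorem find_dist_eq_path_len (xs : List (List Int)) : find_dist xs = path_len xs := by
  cases xs with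
  | nil => simp [find_dist, path_len]
  | cons p t =>
      rw [path_len_cons]
      simp only [find_dist, PySem.List.pyGetD_zero_cons, List.foldl_cons, pvDist_self]
      rw [pvFoldl_walk]
      simp

-- deleting index j (j + 1 < r.length) from a walk removes exactly pvSav
theorem pvWalk_removal (j : Nat) (r : List (List Int)) (l : List Int)
    (h : j + 1 < r.length) :
    pvWalk l (r.take j ++ r.drop (j + 1)) = pvWalk l r - pvSav l r j := by
  induction j generalizing r l with
  | zero =>
      match r, h with
      | b :: c :: t, _ =>
          simp [pvWalk, pvSav, pvPrev]
          ring
  | succ j ih =>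
      match r, h with
      | a :: r', h =>
          have h' : j + 1 < r'.length := by simpa using h
          simp only [List.take_succ_cons, List.drop_succ_cons, List.cons_append, pvWalk]
          rw [ih r' a h']
          have hsav : pvSav l (a :: r') (j + 1) = pvSav a r' j := by
            cases j <;> simp [pvSav, pvPrev]
          rw [hsav]; ring

-- A's loop body value at index j is the savings pvSav
theorem pvSav_eq (x0 : List Int) (rest : List (List Int)) (j : Nat) :
    find_dist [(x0 :: rest).getD j [], (x0 :: rest).getD (j + 1) [], (x0 :: rest).getD (j + 2) []] -
    find_dist [(x0 :: rest).getD j [], (x0 :: rest).getD (j + 2) []] = pvSav x0 rest j := by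
  rw [find_dist_eq_path_len, find_dist_eq_path_len, path_len_cons, path_len_cons]
  have hprev : (x0 :: rest).getD j [] = pvPrev x0 rest j := by
    cases j <;> simp [pvPrev]
  have h1 : (x0 :: rest).getD (j + 1) [] = rest.getD j [] := by simp
  have h2 : (x0 :: rest).getD (j + 2) [] = rest.getD (j + 1) [] := by simp
  rw [hprev, h1, h2]
  simp only [pvSav, pvWalk]
  ring

-- A computes total minus the running maximum of the savings
theorem pvA_eq (x0 : List Int) (rest : List (List Int)) :
    derive_answer (x0 :: rest) =
      path_len (x0 :: rest) - pvMax x0 rest (rest.length - 1) := by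
  have hlen : ((PySem.List.slice (x0 :: rest) (some 1) (some (-1))).length : Int) =
      ((rest.length - 1 : Nat) : Int) := by
    rw [PySem.List.length_slice]
    simp only [List.length_cons, PySem.List.clampIdx_neg_one]
    have h2 : PySem.List.clampIdx (rest.length + 1) 1 = min 1 (rest.length + 1) := by
      exact_mod_cast PySem.List.clampIdx_natCast (rest.length + 1) 1
    rw [h2]
    omega
  simp only [derive_answer]
  rw [hlen, PySem.List.pyRange_one]
  have hkk : (((rest.length - 1 : Nat) : Int) - 0).toNat = rest.length - 1 := by omega
  rw [hkk, List.foldl_map, find_dist_eq_path_len]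
  congr 1
  unfold pvMax
  apply PySem.List.foldl_congr_mem
  intro ml j hj
  simp only [zero_add]
  have e1 : (j : Int) + 1 = ((j + 1 : Nat) : Int) := by push_cast; ring
  have e2 : (j : Int) + 2 = ((j + 2 : Nat) : Int) := by push_cast; ring
  rw [e1, e2]
  simp only [PySem.List.pyGetD_natCast]
  rw [pvSav_eq]

-- B computes the running minimum of total minus savings
theorem pvB_eq (x0 : List Int) (rest : List (List Int)) :
    derive_answer_alt (x0 :: rest) =
      (List.range (rest.length - 1)).foldl
        (fun best j => min best (path_len (x0 :: rest) - pvSav x0 rest j))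
        (path_len (x0 :: rest)) := by
  simp only [derive_answer_alt]
  have hb : (((x0 :: rest).length : Nat) : Int) - 1 = ((rest.length : Nat) : Int) := by
    simp
  rw [hb, PySem.List.pyRange_one]
  have hkk : (((rest.length : Nat) : Int) - 1).toNat = rest.length - 1 := by omega
  rw [hkk, List.foldl_map]
  apply PySem.List.foldl_congr_mem
  intro best j hj
  have hjlen : j + 1 < rest.length := by
    have := List.mem_range.mp hj
    omega
  have e1 : (1 : Int) + (j : Int) = ((j + 1 : Nat) : Int) := by push_cast; ring
  have e2 : ((j + 1 : Nat) : Int) + 1 = ((j + 2 : Nat) : Int) := by push_cast; ring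
  rw [e1, e2, PySem.List.slice_to_natCast, PySem.List.slice_from_natCast]
  have hsplit : ((x0 :: rest).take (j + 1)) ++ ((x0 :: rest).drop (j + 2)) =
      x0 :: (rest.take j ++ rest.drop (j + 1)) := by
    simp
  rw [hsplit, path_len_cons, pvWalk_removal j rest x0 hjlen, path_len_cons]

-- a running minimum of T - s j against the running maximum of s j
theorem pvMin_max_fold (g : Nat -> Int) (T : Int) (l : List Nat) (a : Int) :
    l.foldl (fun best j => min best (T - g j)) (T - a) =
      T - l.foldl (fun ml j => if g j > ml then g j else ml) a := by
  induction l generalizing a with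
  | nil => simp
  | cons x t ih =>
      simp only [List.foldl_cons]
      have h : min (T - a) (T - g x) = T - (if g x > a then g x else a) := by
        split_ifs <;> omega
      rw [h, ih]

-- ===== VERDICT (by name: the statement is the Claim_ definition above) =====
theorem derive_answer_spec : Claim_equal_derive_answer := by
  intro xs _ hpre
  obtain ⟨x0, rest, rfl⟩ := List.exists_cons_of_ne_nil hpre.1
  unfold Spec_derive_answer
  rw [pvA_eq, pvB_eq]
  have h := pvMin_max_fold (fun j => pvSav x0 rest j) (path_len (x0 :: rest))
    (List.range (rest.length - 1)) 0
  rw [sub_zero] at h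
  rw [h]
  rfl
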